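-- pv_equiv track=rewrite | github.com/kiriappeee/advent-of-code-2019 | python/day02.py | getNextOperationMembers
-- ===== SOURCE A (Python) =====
-- def getNextOperationMembers(array_to_extract_next_operation_from, starting_index=0):
--     if array_to_extract_next_operation_from[starting_index] == 99:
--         return [99, starting_index]
--     elif array_to_extract_next_operation_from[starting_index] == 1 or array_to_extract_next_operation_from[starting_index] == 2:
--         operators_to_return = array_to_extract_next_operation_from[starting_index:starting_index+4]
--         operators_to_return.append(starting_index)
--         return operators_to_return
--     else:
--         return getNextOperationMembers(array_to_extract_next_operation_from, starting_index+1)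
-- ===== SOURCE B (Python) =====
-- def getNextOperationMembers(array_to_extract_next_operation_from, starting_index=0):
--     a = array_to_extract_next_operation_from
--     i = next(j for j in range(starting_index, len(a)) if a[j] in (1, 2, 99))
--     if a[i] == 99:
--         return [99, i]
--     return a[i:i + 4] + [i]
-- ===== Notes on version B (the rewrite author's own statement) =====
-- stated objective: idiomatic
-- what changed: Replaces the tail recursion that re-indexes and branches at every position with a single find-first scan (next over a range generator) followed by one branch that builds the result.
import Mathlib
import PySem

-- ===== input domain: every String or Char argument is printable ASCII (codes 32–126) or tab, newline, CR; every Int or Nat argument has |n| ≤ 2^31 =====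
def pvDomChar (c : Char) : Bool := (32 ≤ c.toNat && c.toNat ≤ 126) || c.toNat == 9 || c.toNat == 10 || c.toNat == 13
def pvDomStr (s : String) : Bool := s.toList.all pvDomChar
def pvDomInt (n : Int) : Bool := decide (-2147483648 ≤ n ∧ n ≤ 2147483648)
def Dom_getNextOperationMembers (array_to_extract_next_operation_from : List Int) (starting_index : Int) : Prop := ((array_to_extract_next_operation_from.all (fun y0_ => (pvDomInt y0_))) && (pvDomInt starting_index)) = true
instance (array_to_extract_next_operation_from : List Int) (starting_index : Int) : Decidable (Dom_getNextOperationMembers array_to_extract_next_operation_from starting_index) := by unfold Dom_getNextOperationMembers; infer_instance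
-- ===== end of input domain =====

-- B replaces A's tail recursion with a find-first scan plus one result-building branch (idiomatic; same cost).

-- ===== PORT A =====
-- used by A's termination proof: a successful index read means the index is below the length
theorem pvGet_lt (a : List Int) (i : Int) (v : Int) (h : PySem.List.pyGet? a i = some v) :
    i < (a.length : Int) := by
  by_contra hge
  rw [(PySem.List.pyGet?_eq_none_iff a i).mpr (by unfold PySem.Raise.InRange; omega)] at h
  simp at h

def getNextOperationMembers (array_to_extract_next_operation_from : List Int) (starting_index : Int) : List Int :=
  match h : PySem.List.pyGet? array_to_extract_next_operation_from starting_index with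
  | none => []  -- Python raises IndexError here; excluded by Pre_
  | some v =>
    if v == 99 then
      [99, starting_index]
    else if v == 1 || v == 2 then
      PySem.List.slice array_to_extract_next_operation_from (some starting_index) (some (starting_index + 4)) ++ [starting_index]
    else
      getNextOperationMembers array_to_extract_next_operation_from (starting_index + 1)
termination_by ((array_to_extract_next_operation_from.length : Int) - starting_index).toNat
decreasing_by
  have := pvGet_lt _ _ _ h
  omega

-- ===== PORT B =====
-- the generator's filter: a[j] in (1, 2, 99)
def pvIsOp (a : List Int) (j : Int) : Bool :=
  match PySem.List.pyGet? a j with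
  | some v => v == 1 || v == 2 || v == 99
  | none => false

def getNextOperationMembers_alt (array_to_extract_next_operation_from : List Int) (starting_index : Int) : List Int :=
  match (PySem.List.pyRange starting_index (array_to_extract_next_operation_from.length : Int) 1).find?
      (pvIsOp array_to_extract_next_operation_from) with
  | none => []  -- Python raises StopIteration here; excluded by Pre_
  | some i =>
    if PySem.List.pyGetD array_to_extract_next_operation_from i 0 == 99 then
      [99, i]
    else
      PySem.List.slice array_to_extract_next_operation_from (some i) (some (i + 4)) ++ [i]

-- ===== PRECONDITION & SPEC =====
-- Pre_ = exactly the inputs where A returns: the start index is a valid Python index direction (≥ -len)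
-- and some position in [start, len) holds 1, 2 or 99; elsewhere A raises IndexError/RecursionError.
def Pre_getNextOperationMembers (array_to_extract_next_operation_from : List Int) (starting_index : Int) : Prop :=
  -(array_to_extract_next_operation_from.length : Int) ≤ starting_index ∧
  (PySem.List.pyRange starting_index (array_to_extract_next_operation_from.length : Int) 1).any
    (pvIsOp array_to_extract_next_operation_from) = true
instance (array_to_extract_next_operation_from : List Int) (starting_index : Int) : Decidable (Pre_getNextOperationMembers array_to_extract_next_operation_from starting_index) := by unfold Pre_getNextOperationMembers; infer_instance

def pvWitness_getNextOperationMembers : List Int × Int := ([1, 0, 0, 0, 99], 0)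

def Spec_getNextOperationMembers (array_to_extract_next_operation_from : List Int) (starting_index : Int) (out : List Int) : Prop := out = getNextOperationMembers_alt array_to_extract_next_operation_from starting_index
instance (array_to_extract_next_operation_from : List Int) (starting_index : Int) (out : List Int) : Decidable (Spec_getNextOperationMembers array_to_extract_next_operation_from starting_index out) := by unfold Spec_getNextOperationMembers; infer_instance

-- ===== CLAIM (what is proved, stated in full; the proofs are below) =====
def Claim_equal_getNextOperationMembers : Prop := ∀ (array_to_extract_next_operation_from : List Int) (starting_index : Int), Dom_getNextOperationMembers array_to_extract_next_operation_from starting_index → Pre_getNextOperationMembers array_to_extract_next_operation_from starting_index → Spec_getNextOperationMembers array_to_extract_next_operation_from starting_index (getNextOperationMembers array_to_extract_next_operation_from starting_index)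

-- ===== LEMMAS AND PROOFS =====

theorem pvMain (a : List Int) (s : Int)
    (hlo : -(a.length : Int) ≤ s)
    (hany : (PySem.List.pyRange s (a.length : Int) 1).any (pvIsOp a) = true) :
    getNextOperationMembers a s = getNextOperationMembers_alt a s := by
  have H : ∀ n : Nat, ∀ s : Int, ((a.length : Int) - s).toNat ≤ n →
      -(a.length : Int) ≤ s →
      (PySem.List.pyRange s (a.length : Int) 1).any (pvIsOp a) = true →
      getNextOperationMembers a s = getNextOperationMembers_alt a s := by
    intro n
    induction n with
    | zero =>
      intro s hle hlo hany
      rw [PySem.List.pyRange_one_eq_nil (by omega)] at hany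
      simp at hany
    | succ n ih =>
      intro s hle hlo hany
      have hslt : s < (a.length : Int) := by
        by_contra h
        rw [PySem.List.pyRange_one_eq_nil (by omega)] at hany
        simp at hany
      have hcons := PySem.List.pyRange_one_cons hslt (a := s) (b := (a.length : Int))
      obtain ⟨v, hv⟩ : ∃ v, PySem.List.pyGet? a s = some v := by
        cases hg : PySem.List.pyGet? a s with
        | none =>
          rw [PySem.List.pyGet?_eq_none_iff] at hg
          exact absurd (by unfold PySem.Raise.InRange; omega) hg
        | some v => exact ⟨v, rfl⟩
      have hgetD : PySem.List.pyGetD a s 0 = v := by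
        unfold PySem.List.pyGetD
        rw [hv]
        rfl
      have hA : getNextOperationMembers a s =
          (if v == 99 then [99, s]
           else if v == 1 || v == 2 then
             PySem.List.slice a (some s) (some (s + 4)) ++ [s]
           else getNextOperationMembers a (s + 1)) := by
        rw [getNextOperationMembers.eq_def, hv]
      by_cases hop : pvIsOp a s = true
      · -- found at s: find? returns s on the B side
        have hfind : (PySem.List.pyRange s (a.length : Int) 1).find? (pvIsOp a) = some s := by
          rw [hcons]
          simp [hop]
        rw [hA]
        unfold getNextOperationMembers_alt
        rw [hfind]
        unfold pvIsOp at hop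
        rw [hv] at hop
        simp only [hgetD]
        by_cases h99 : v = 99
        · simp [h99]
        · have h12 : v = 1 ∨ v = 2 := by
            simp only [Bool.or_eq_true, beq_iff_eq] at hop
            rcases hop with (h | h) | h
            · exact Or.inl h
            · exact Or.inr h
            · exact absurd h h99
          rcases h12 with h | h <;> simp [h]
      · -- not an op at s: both sides step to s + 1
        have hop' : pvIsOp a s = false := by
          cases hb : pvIsOp a s
          · rfl
          · exact absurd hb hop
        have hnv : ¬(v = 99) ∧ ¬(v = 1) ∧ ¬(v = 2) := by
          unfold pvIsOp at hop'
          rw [hv] at hop'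
          simp only [Bool.or_eq_false_iff, beq_eq_false_iff_ne, ne_eq] at hop'
          exact ⟨hop'.2, hop'.1.1, hop'.1.2⟩
        have hany' : (PySem.List.pyRange (s + 1) (a.length : Int) 1).any (pvIsOp a) = true := by
          rw [hcons] at hany
          simpa [hop'] using hany
        have hstep := ih (s + 1) (by omega) (by omega) hany'
        rw [hA, if_neg (by simp [hnv.1]), if_neg (by simp [hnv.2.1, hnv.2.2]), hstep]
        -- B skips s as well
        unfold getNextOperationMembers_alt
        rw [hcons]
        simp [hop']
  exact H ((a.length : Int) - s).toNat s le_rfl hlo hany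

-- ===== VERDICT (by name: the statement is the Claim_ definition above) =====
theorem getNextOperationMembers_spec : Claim_equal_getNextOperationMembers := by
  intro a s _ hpre
  exact pvMain a s hpre.1 hpre.2
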